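-- pv_equiv track=rewrite | github.com/chat-DSCI560-fa25/chat-DSCI560-fa25 | Lab8/core/analysis.py | extract_cluster_keywords
-- ===== SOURCE A (Python) =====
-- from collections import Counter
--
-- def extract_cluster_keywords(posts, cluster_labels, n_keywords=10):
--     """
--     Extract keywords associated with messages in each cluster
--     as required by the assignment.
--     """
--     cluster_keywords = {}
--
--     # Group posts by cluster
--     clusters = {}
--     for i, post in enumerate(posts):
--         cluster_id = cluster_labels[i]
--         if cluster_id not in clusters:
--             clusters[cluster_id] = []
--
--         # Combine title and text for keyword extraction
--         text = (post.get('title', '') + ' ' + post.get('post_body_cleaned', '')).strip()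
--         if text:
--             clusters[cluster_id].append(text)
--
--     # Extract keywords for each cluster
--     for cluster_id, texts in clusters.items():
--         # Combine all texts in cluster
--         combined_text = ' '.join(texts).lower()
--
--         # Simple keyword extraction (you can enhance this with TF-IDF)
--         words = combined_text.split()
--         word_freq = Counter(words)
--
--         # Filter out common words and get top keywords
--         common_words = {'the', 'a', 'an', 'and', 'or', 'but', 'in', 'on', 'at', 'to', 'for',
--                        'of', 'with', 'by', 'is', 'are', 'was', 'were', 'be', 'been', 'have',
--                        'has', 'had', 'do', 'does', 'did', 'will', 'would', 'could', 'should',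
--                        'this', 'that', 'these', 'those', 'i', 'you', 'he', 'she', 'it', 'we', 'they'}
--
--         keywords = []
--         for word, freq in word_freq.most_common():
--             if (len(word) > 2 and
--                 word not in common_words and
--                 word.isalpha() and
--                 len(keywords) < n_keywords):
--                 keywords.append((word, freq))
--
--         cluster_keywords[cluster_id] = keywords
--
--     return cluster_keywords
-- ===== SOURCE B (Python) =====
-- _STOPWORDS = frozenset({'the', 'a', 'an', 'and', 'or', 'but', 'in', 'on', 'at', 'to', 'for',
--                         'of', 'with', 'by', 'is', 'are', 'was', 'were', 'be', 'been', 'have',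
--                         'has', 'had', 'do', 'does', 'did', 'will', 'would', 'could', 'should',
--                         'this', 'that', 'these', 'those', 'i', 'you', 'he', 'she', 'it', 'we', 'they'})
--
--
-- def extract_cluster_keywords(posts, cluster_labels, n_keywords=10):
--     """Bucket-sort re-implementation: one zip pass collects each cluster's
--     words; frequencies are counted by hand; eligible words are bucketed by
--     frequency and emitted bucket-by-bucket in descending frequency order
--     (no Counter, no comparison sort)."""
--     order = []
--     words_of = {}
--     for post, cluster_id in zip(posts, cluster_labels):
--         if cluster_id not in words_of:
--             order.append(cluster_id)
--             words_of[cluster_id] = []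
--         text = (post.get('title', '') + ' ' + post.get('post_body_cleaned', '')).strip()
--         if text:
--             words_of[cluster_id].extend(text.lower().split())
--
--     result = {}
--     for cluster_id in order:
--         seen = {}
--         for w in words_of[cluster_id]:
--             if w in seen:
--                 seen[w] += 1
--             else:
--                 seen[w] = 1
--         buckets = {}
--         maxf = 0
--         for w, f in seen.items():
--             if len(w) > 2 and w.isalpha() and w not in _STOPWORDS:
--                 buckets.setdefault(f, []).append((w, f))
--                 if f > maxf:
--                     maxf = f
--         keywords = []
--         for f in range(maxf, 0, -1):
--             if len(keywords) >= n_keywords: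
--                 break
--             for wf in buckets.get(f, []):
--                 if len(keywords) >= n_keywords:
--                     break
--                 keywords.append(wf)
--         result[cluster_id] = keywords
--     return result
-- ===== Notes on version B (the rewrite author's own statement) =====
-- stated objective: alternative
-- what changed: B replaces A's Counter + most_common comparison sort + capped filtered scan by a bucket (counting) sort: one zip pass collects each cluster's word list, frequencies are counted by a hand-rolled dict, eligible words are bucketed by frequency, and buckets are emitted in descending frequency order up to the cap.
import Mathlib
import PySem

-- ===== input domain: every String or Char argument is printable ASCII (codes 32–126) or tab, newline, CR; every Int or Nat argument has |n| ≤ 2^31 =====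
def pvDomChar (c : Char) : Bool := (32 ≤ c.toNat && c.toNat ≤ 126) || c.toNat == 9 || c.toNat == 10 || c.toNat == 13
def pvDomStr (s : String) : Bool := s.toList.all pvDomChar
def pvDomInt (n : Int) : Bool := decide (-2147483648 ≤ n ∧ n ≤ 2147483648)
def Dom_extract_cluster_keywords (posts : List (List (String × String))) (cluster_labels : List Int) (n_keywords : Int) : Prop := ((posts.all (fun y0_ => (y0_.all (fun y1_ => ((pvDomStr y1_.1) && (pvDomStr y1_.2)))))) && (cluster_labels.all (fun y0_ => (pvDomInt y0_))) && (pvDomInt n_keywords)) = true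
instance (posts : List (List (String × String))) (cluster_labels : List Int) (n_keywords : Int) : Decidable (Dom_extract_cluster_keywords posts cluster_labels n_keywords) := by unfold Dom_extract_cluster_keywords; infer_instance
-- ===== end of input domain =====

-- B replaces A's Counter + most_common (comparison sort) + capped filtered scan by a
-- bucket (counting) sort over frequencies; same return value, no speed claim.

-- ===== PORT A =====
-- the stop-word set (identical literal in both Pythons)
def pvStopwords : PySem.Set String := PySem.Set.ofList
  ["the", "a", "an", "and", "or", "but", "in", "on", "at", "to", "for",
   "of", "with", "by", "is", "are", "was", "were", "be", "been", "have",
   "has", "had", "do", "does", "did", "will", "would", "could", "should",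
   "this", "that", "these", "those", "i", "you", "he", "she", "it", "we", "they"]

-- (post.get('title','') + ' ' + post.get('post_body_cleaned','')).strip() — the same line in both Pythons
def pvText (post : List (String × String)) : String :=
  PySem.Str.strip ((PySem.Dict.ofList post).getD "title" "" ++ " " ++ (PySem.Dict.ofList post).getD "post_body_cleaned" "")

def extract_cluster_keywords (posts : List (List (String × String))) (cluster_labels : List Int) (n_keywords : Int) : List (Int × List (String × Int)) :=
  -- phase 1: group texts by cluster id
  let clusters : PySem.Dict Int (List String) :=
    (PySem.List.enumerate posts).foldl (fun cl ip =>
      let cid := (PySem.List.pyGet? cluster_labels ip.1).getD 0  -- IndexError outside Pre_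
      let cl := if cl.contains cid then cl else cl.insert cid []
      let text := pvText ip.2
      if text ≠ "" then cl.modify cid [] (fun ts => ts ++ [text]) else cl) PySem.Dict.empty
  -- phase 2: join, lower, split, count, filter
  let cluster_keywords : PySem.Dict Int (List (String × Int)) :=
    clusters.items.foldl (fun ck kt =>
      let combined := PySem.Str.lower (PySem.Str.join " " kt.2)
      let words := PySem.Str.split₀ combined
      let word_freq := PySem.Dict.counter words
      -- Counter.most_common() = items sorted by count, reverse=True, stable
      let keywords := (PySem.List.sorted word_freq.items (fun p => p.2) true).foldl
        (fun kws wf =>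
          if PySem.Str.len wf.1 > 2 ∧ wf.1 ∉ pvStopwords ∧ PySem.Str.strIsalpha wf.1 = true ∧ (kws.length : Int) < n_keywords
          then kws ++ [wf] else kws) []
      ck.insert kt.1 keywords) PySem.Dict.empty
  cluster_keywords.items

-- ===== PORT B =====
def pvWords (text : String) : List String := PySem.Str.split₀ (PySem.Str.lower text)

def extract_cluster_keywords_alt (posts : List (List (String × String))) (cluster_labels : List Int) (n_keywords : Int) : List (Int × List (String × Int)) :=
  -- one zip pass: insertion-order list of cluster ids + per-cluster word list
  let st :=
    (posts.zip cluster_labels).foldl (fun st pc =>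
      let st := if st.2.contains pc.2 then st else (st.1 ++ [pc.2], st.2.insert pc.2 [])
      let text := pvText pc.1
      if text ≠ "" then (st.1, st.2.modify pc.2 [] (fun ws => ws ++ pvWords text)) else st)
      (([] : List Int), (PySem.Dict.empty : PySem.Dict Int (List String)))
  -- per cluster: hand-count, bucket eligible words by frequency, emit buckets high-to-low
  let result :=
    st.1.foldl (fun result cid =>
      let seen : PySem.Dict String Int :=
        (st.2.getD cid []).foldl (fun seen w =>
          if seen.contains w then seen.insert w (seen.getD w 0 + 1) else seen.insert w 1)
          PySem.Dict.empty
      let bm : PySem.Dict Int (List (String × Int)) × Int :=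
        seen.items.foldl (fun bm wf =>
          if PySem.Str.len wf.1 > 2 ∧ PySem.Str.strIsalpha wf.1 = true ∧ wf.1 ∉ pvStopwords then
            -- buckets.setdefault(f, []).append((w, f)) appends in place = Dict.modify
            (bm.1.modify wf.2 [] (fun b => b ++ [wf]), if wf.2 > bm.2 then wf.2 else bm.2)
          else bm) (PySem.Dict.empty, 0)
      let keywords :=
        (PySem.List.pyRange bm.2 0 (-1)).foldl (fun kws f =>
          if n_keywords ≤ (kws.length : Int) then kws  -- break
          else (bm.1.getD f []).foldl (fun kws wf =>
            if n_keywords ≤ (kws.length : Int) then kws  -- break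
            else kws ++ [wf]) kws) []
      result.insert cid keywords) PySem.Dict.empty
  result.items

-- ===== PRECONDITION & SPEC =====
-- Python A raises IndexError at cluster_labels[i] when posts is longer than cluster_labels; excluded here.
def Pre_extract_cluster_keywords (posts : List (List (String × String))) (cluster_labels : List Int) (n_keywords : Int) : Prop :=
  posts.length ≤ cluster_labels.length
instance (posts : List (List (String × String))) (cluster_labels : List Int) (n_keywords : Int) : Decidable (Pre_extract_cluster_keywords posts cluster_labels n_keywords) := by unfold Pre_extract_cluster_keywords; infer_instance

def pvWitness_extract_cluster_keywords : (List (List (String × String))) × List Int × Int :=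
  ([[("title", "cat dog cat")], [("post_body_cleaned", "bird the cat")]], [0, 0], 2)

def Spec_extract_cluster_keywords (posts : List (List (String × String))) (cluster_labels : List Int) (n_keywords : Int) (out : List (Int × List (String × Int))) : Prop := out = extract_cluster_keywords_alt posts cluster_labels n_keywords
instance (posts : List (List (String × String))) (cluster_labels : List Int) (n_keywords : Int) (out : List (Int × List (String × Int))) : Decidable (Spec_extract_cluster_keywords posts cluster_labels n_keywords out) := by unfold Spec_extract_cluster_keywords; infer_instance

-- ===== CLAIM (what is proved, stated in full; the proofs are below) =====
def Claim_equal_extract_cluster_keywords : Prop := ∀ (posts : List (List (String × String))) (cluster_labels : List Int) (n_keywords : Int), Dom_extract_cluster_keywords posts cluster_labels n_keywords → Pre_extract_cluster_keywords posts cluster_labels n_keywords → Spec_extract_cluster_keywords posts cluster_labels n_keywords (extract_cluster_keywords posts cluster_labels n_keywords)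

-- ===== LEMMAS AND PROOFS =====

-- ---- split()/lower()/join() facts (A joins texts before splitting; B splits each text) ----
theorem pv_go_acc (s : List Char) : ∀ cur acc, PySem.Chars.split₀.go s cur acc = acc.reverse ++ PySem.Chars.split₀.go s cur [] := by
  induction s with
  | nil => intro cur acc; simp only [PySem.Chars.split₀.go]; split <;> simp
  | cons c t ih =>
    intro cur acc
    simp only [PySem.Chars.split₀.go]
    split
    · split
      · exact ih [] acc
      · rw [ih [] (cur.reverse :: acc), ih [] [cur.reverse]]; simp
    · exact ih (c :: cur) acc

theorem pv_go_space (a : List Char) : ∀ cur acc b, PySem.Chars.split₀.go (a ++ ' ' :: b) cur acc = PySem.Chars.split₀.go a cur acc ++ PySem.Chars.split₀.go b [] [] := by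
  induction a with
  | nil =>
    intro cur acc b
    simp only [List.nil_append, PySem.Chars.split₀.go]
    have hsp : PySem.Chars.isspace ' ' = true := by decide
    rw [if_pos hsp]
    split <;> rw [pv_go_acc] <;> simp
  | cons c t ih =>
    intro cur acc b
    simp only [List.cons_append, PySem.Chars.split₀.go]
    split
    · split
      · exact ih [] acc b
      · exact ih [] (cur.reverse :: acc) b
    · exact ih (c :: cur) acc b

theorem pv_split₀_space (a b : List Char) : PySem.Chars.split₀ (a ++ ' ' :: b) = PySem.Chars.split₀ a ++ PySem.Chars.split₀ b := by
  simpa [PySem.Chars.split₀] using pv_go_space a [] [] b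

theorem pv_words_join_chars (parts : List (List Char)) :
    PySem.Chars.split₀ (PySem.Chars.lower (PySem.Chars.join [' '] parts)) = parts.flatMap (fun t => PySem.Chars.split₀ (PySem.Chars.lower t)) := by
  induction parts with
  | nil => rfl
  | cons p t ih =>
    cases t with
    | nil => simp [PySem.Chars.join, List.intercalate]
    | cons q r =>
      have hj : PySem.Chars.join [' '] (p :: q :: r) = p ++ ' ' :: PySem.Chars.join [' '] (q :: r) := by
        simp [PySem.Chars.join, List.intercalate, List.intersperse]
      have hl : PySem.Chars.lower (p ++ ' ' :: PySem.Chars.join [' '] (q :: r)) =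
          PySem.Chars.lower p ++ ' ' :: PySem.Chars.lower (PySem.Chars.join [' '] (q :: r)) := by
        simp [PySem.Chars.lower, show PySem.Chars.lowerChar ' ' = ' ' from by decide]
      rw [hj, hl, pv_split₀_space, ih]
      simp

theorem pv_words_join (texts : List String) :
    PySem.Str.split₀ (PySem.Str.lower (PySem.Str.join " " texts)) = texts.flatMap pvWords := by
  simp only [PySem.Str.split₀, PySem.Str.toList_lower, PySem.Str.toList_join]
  have h : (" " : String).toList = [' '] := rfl
  rw [h, pv_words_join_chars]
  simp only [List.flatMap_map, List.map_flatMap]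
  apply List.flatMap_congr
  intro s _
  simp [pvWords, PySem.Str.split₀, PySem.Str.toList_lower]

-- ---- phase 1: A's enumerate/index loop vs B's zip loop ----
theorem pv_enum_zip {α σ : Type} (labels : List Int) (G : σ → Int → α → σ) :
    ∀ (posts : List α) (k : Nat) (init : σ), k + posts.length ≤ labels.length →
      (PySem.List.enumerate posts (k : Int)).foldl (fun s ip => G s ((PySem.List.pyGet? labels ip.1).getD 0) ip.2) init =
      (posts.zip (labels.drop k)).foldl (fun s pc => G s pc.2 pc.1) init := by
  intro posts
  induction posts with
  | nil => intro k init _; rfl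
  | cons p ps ih =>
    intro k init h
    have hk : k < labels.length := by simp at h; omega
    rw [PySem.List.enumerate_cons]
    have hd : labels.drop k = labels[k] :: labels.drop (k + 1) := (List.getElem_cons_drop hk).symm
    rw [hd]
    simp only [List.zip_cons_cons, List.foldl_cons]
    have hg : (PySem.List.pyGet? labels (k : Int)).getD 0 = labels[k] := by
      rw [PySem.List.pyGet?_natCast, List.getElem?_eq_getElem hk]; rfl
    rw [hg]
    have : ((k : Int) + 1) = ((k + 1 : Nat) : Int) := by push_cast; ring
    rw [this, ih (k + 1) _ (by simp at h ⊢; omega)]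

-- the value map relating A's per-cluster text lists to B's per-cluster word lists
def pvG (d : PySem.Dict Int (List String)) : PySem.Dict Int (List String) :=
  PySem.Dict.mk (d.items.map (fun p => (p.1, p.2.flatMap pvWords)))

theorem pv_G_get? (d : PySem.Dict Int (List String)) (k : Int) :
    (pvG d).get? k = (d.get? k).map (fun ts => ts.flatMap pvWords) := by
  obtain ⟨l⟩ := d
  induction l with
  | nil => rfl
  | cons p t ih =>
    obtain ⟨k1, v1⟩ := p
    simp only [pvG, List.map_cons, PySem.Dict.get?_mk_cons] at ih ⊢
    by_cases h : (k1 == k) = true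
    · rw [if_pos h, if_pos h]; rfl
    · rw [if_neg (by simpa using h), if_neg (by simpa using h)]
      exact ih

theorem pv_G_contains (d : PySem.Dict Int (List String)) (k : Int) :
    (pvG d).contains k = d.contains k := by
  rw [PySem.Dict.contains_eq_isSome_get?, PySem.Dict.contains_eq_isSome_get?, pv_G_get?]
  cases d.get? k <;> rfl

theorem pv_G_getD (d : PySem.Dict Int (List String)) (k : Int) :
    (pvG d).getD k [] = (d.getD k []).flatMap pvWords := by
  rw [PySem.Dict.getD_eq_get?_getD, PySem.Dict.getD_eq_get?_getD, pv_G_get?]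
  cases d.get? k <;> rfl

theorem pv_G_insert (d : PySem.Dict Int (List String)) (k : Int) (ts : List String) :
    pvG (d.insert k ts) = (pvG d).insert k (ts.flatMap pvWords) := by
  by_cases h : d.contains k = true
  · have h' : (pvG d).contains k = true := by rw [pv_G_contains]; exact h
    apply PySem.Dict.ext
    rw [PySem.Dict.items_insert_of_contains _ _ h']
    show ((d.insert k ts).items.map _) = _
    rw [PySem.Dict.items_insert_of_contains _ _ h]
    show _ = ((d.items.map _).map _)
    rw [List.map_map, List.map_map]
    apply List.map_congr_left
    intro p _
    by_cases hp : p.1 = k <;> simp [hp]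
  · have h' : (pvG d).contains k = false := by rw [pv_G_contains]; simpa using h
    apply PySem.Dict.ext
    rw [PySem.Dict.items_insert_of_not_contains _ _ h']
    show ((d.insert k ts).items.map _) = _
    rw [PySem.Dict.items_insert_of_not_contains _ _ (by simpa using h)]
    simp [pvG]

-- pvH sends A's phase-1 state to B's (order list, word-list dict) state
def pvH (d : PySem.Dict Int (List String)) : List Int × PySem.Dict Int (List String) :=
  (d.keys, pvG d)

theorem pv_step (c : PySem.Dict Int (List String)) (pc : List (String × String) × Int) :
    (let st := if (pvH c).2.contains pc.2 then pvH c else ((pvH c).1 ++ [pc.2], (pvH c).2.insert pc.2 [])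
     if pvText pc.1 ≠ "" then (st.1, st.2.modify pc.2 [] (fun ws => ws ++ pvWords (pvText pc.1))) else st) =
    pvH (let c1 := if c.contains pc.2 then c else c.insert pc.2 []
         if pvText pc.1 ≠ "" then c1.modify pc.2 [] (fun ts => ts ++ [pvText pc.1]) else c1) := by
  simp only [pvH, pv_G_contains]
  by_cases hc : c.contains pc.2 = true
  · rw [if_pos hc, if_pos hc]
    by_cases ht : pvText pc.1 ≠ ""
    · rw [if_pos ht, if_pos ht]
      simp only [PySem.Dict.modify, pv_G_insert, pv_G_getD]
      refine Prod.ext ?_ (by simp [List.flatMap_append])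
      exact (PySem.Dict.keys_insert_of_contains _ _ hc).symm
    · rw [if_neg ht, if_neg ht]
  · rw [if_neg hc, if_neg hc]
    have hkeys : (c.insert pc.2 []).keys = c.keys ++ [pc.2] :=
      PySem.Dict.keys_insert_of_not_contains _ _ (by simpa using hc)
    have hG : pvG (c.insert pc.2 []) = (pvG c).insert pc.2 [] := by
      simpa using pv_G_insert c pc.2 []
    by_cases ht : pvText pc.1 ≠ ""
    · rw [if_pos ht, if_pos ht]
      simp only [PySem.Dict.modify]
      have hc2 : (c.insert pc.2 []).contains pc.2 = true := PySem.Dict.contains_insert_self _ _ _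
      refine Prod.ext ?_ ?_
      · rw [PySem.Dict.keys_insert_of_contains _ _ hc2, hkeys]
      · show _ = pvG ((c.insert pc.2 []).insert pc.2 _)
        rw [pv_G_insert, hG]
        simp [PySem.Dict.getD_insert_self]
    · rw [if_neg ht, if_neg ht]
      exact Prod.ext hkeys.symm hG.symm

theorem pv_zipA (posts : List (List (String × String))) (cluster_labels : List Int)
    (h : posts.length ≤ cluster_labels.length) :
    ((PySem.List.enumerate posts).foldl (fun cl ip =>
        let cid := (PySem.List.pyGet? cluster_labels ip.1).getD 0
        let cl := if cl.contains cid then cl else cl.insert cid []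
        let text := pvText ip.2
        if text ≠ "" then cl.modify cid [] (fun ts => ts ++ [text]) else cl) PySem.Dict.empty) =
    ((posts.zip cluster_labels).foldl (fun c1 pc =>
        let c2 := if c1.contains pc.2 then c1 else c1.insert pc.2 []
        if pvText pc.1 ≠ "" then c2.modify pc.2 [] (fun ts => ts ++ [pvText pc.1]) else c2)
      PySem.Dict.empty) := by
  have := pv_enum_zip cluster_labels
    (fun c1 cid post =>
      let c2 := if c1.contains cid then c1 else c1.insert cid []
      if pvText post ≠ "" then c2.modify cid [] (fun ts => ts ++ [pvText post]) else c2)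
    posts 0 PySem.Dict.empty (by simpa using h)
  simpa using this

theorem pv_phase1hom (l : List ((List (String × String)) × Int)) :
    (l.foldl (fun st pc =>
        let st := if st.2.contains pc.2 then st else (st.1 ++ [pc.2], st.2.insert pc.2 [])
        let text := pvText pc.1
        if text ≠ "" then (st.1, st.2.modify pc.2 [] (fun ws => ws ++ pvWords text)) else st)
      (([] : List Int), (PySem.Dict.empty : PySem.Dict Int (List String)))) =
    pvH (l.foldl (fun c1 pc =>
        let c2 := if c1.contains pc.2 then c1 else c1.insert pc.2 []
        if pvText pc.1 ≠ "" then c2.modify pc.2 [] (fun ts => ts ++ [pvText pc.1]) else c2)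
      PySem.Dict.empty) := by
  have h0 : (([] : List Int), (PySem.Dict.empty : PySem.Dict Int (List String))) =
      pvH PySem.Dict.empty := rfl
  rw [h0]
  exact List.foldl_hom pvH (fun c pc => pv_step c pc)

-- keys of A's phase-1 dict stay Nodup
theorem pv_nodup (l : List ((List (String × String)) × Int)) :
    ∀ c : PySem.Dict Int (List String), c.keys.Nodup →
    (l.foldl (fun c1 pc =>
        let c2 := if c1.contains pc.2 then c1 else c1.insert pc.2 []
        if pvText pc.1 ≠ "" then c2.modify pc.2 [] (fun ts => ts ++ [pvText pc.1]) else c2) c).keys.Nodup := by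
  induction l with
  | nil => intro c hc; exact hc
  | cons pc t ih =>
    intro c hc
    simp only [List.foldl_cons]
    apply ih
    have hstep : ∀ c2 : PySem.Dict Int (List String), c2.keys.Nodup → c2.contains pc.2 = true →
        (if pvText pc.1 ≠ "" then c2.modify pc.2 [] (fun ts => ts ++ [pvText pc.1]) else c2).keys.Nodup := by
      intro c2 h2 hcon
      by_cases ht : pvText pc.1 ≠ ""
      · rw [if_pos ht, PySem.Dict.keys_modify, PySem.Dict.keys_insert_of_contains _ _ hcon]
        exact h2
      · rw [if_neg ht]; exact h2
    by_cases hcon : c.contains pc.2 = true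
    · simp only [if_pos hcon]
      exact hstep c hc hcon
    · simp only [if_neg hcon]
      refine hstep _ ?_ (PySem.Dict.contains_insert_self _ _ _)
      rw [PySem.Dict.keys_insert_of_not_contains _ _ (by simpa using hcon)]
      have : pc.2 ∉ c.keys := fun hm =>
        hcon ((PySem.Dict.contains_iff_mem_keys c pc.2).mpr hm)
      refine List.Nodup.append hc (List.nodup_singleton _) ?_
      intro a ha hb
      rw [List.mem_singleton] at hb
      subst hb
      exact this ha

-- ---- per-cluster computations, named for the proofs ----
def pvAkw (n : Int) (texts : List String) : List (String × Int) :=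
  (PySem.List.sorted (PySem.Dict.counter (PySem.Str.split₀ (PySem.Str.lower (PySem.Str.join " " texts)))).items (fun p => p.2) true).foldl
    (fun kws wf =>
      if PySem.Str.len wf.1 > 2 ∧ wf.1 ∉ pvStopwords ∧ PySem.Str.strIsalpha wf.1 = true ∧ (kws.length : Int) < n
      then kws ++ [wf] else kws) []

def pvSeen (ws : List String) : PySem.Dict String Int :=
  ws.foldl (fun seen w =>
    if seen.contains w then seen.insert w (seen.getD w 0 + 1) else seen.insert w 1)
    PySem.Dict.empty

def pvBM (ws : List String) : PySem.Dict Int (List (String × Int)) × Int :=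
  (pvSeen ws).items.foldl (fun bm wf =>
    if PySem.Str.len wf.1 > 2 ∧ PySem.Str.strIsalpha wf.1 = true ∧ wf.1 ∉ pvStopwords then
      (bm.1.modify wf.2 [] (fun b => b ++ [wf]), if wf.2 > bm.2 then wf.2 else bm.2)
    else bm) (PySem.Dict.empty, 0)

def pvBkw (n : Int) (ws : List String) : List (String × Int) :=
  (PySem.List.pyRange (pvBM ws).2 0 (-1)).foldl (fun kws f =>
    if n ≤ (kws.length : Int) then kws
    else ((pvBM ws).1.getD f []).foldl (fun kws wf =>
      if n ≤ (kws.length : Int) then kws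
      else kws ++ [wf]) kws) []

-- the eligibility predicate, as a Bool
def pvPredB (wf : String × Int) : Bool :=
  decide (PySem.Str.len wf.1 > 2 ∧ PySem.Str.strIsalpha wf.1 = true ∧ wf.1 ∉ pvStopwords)

-- the bucketed (counting-sort) arrangement: buckets m, m-1, …, 1
def pvBkt (m : Int) (l : List (String × Int)) : List (String × Int) :=
  (PySem.List.pyRange m 0 (-1)).flatMap (fun f => l.filter (fun p => p.2 == f))

-- ---- per-cluster ingredients ----
theorem pv_handcount (ws : List String) : pvSeen ws = PySem.Dict.counter ws := by
  unfold pvSeen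
  rw [PySem.Dict.counter_eq_foldl]
  apply PySem.List.foldl_congr_mem
  intro acc w _
  by_cases h : acc.contains w = true
  · simp [h, PySem.Dict.modify]
  · simp [h, PySem.Dict.modify, PySem.Dict.getD_of_not_contains acc _ (by simpa using h)]

theorem pv_bm_eq (items : List (String × Int)) :
    items.foldl (fun bm wf =>
      if PySem.Str.len wf.1 > 2 ∧ PySem.Str.strIsalpha wf.1 = true ∧ wf.1 ∉ pvStopwords then
        (bm.1.modify wf.2 [] (fun b => b ++ [wf]), if wf.2 > bm.2 then wf.2 else bm.2)
      else bm) ((PySem.Dict.empty : PySem.Dict Int (List (String × Int))), (0 : Int)) =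
    ((items.filter pvPredB).foldl (fun d wf => d.modify wf.2 [] (fun b => b ++ [wf])) PySem.Dict.empty,
     (items.filter pvPredB).foldl (fun m wf => if wf.2 > m then wf.2 else m) 0) := by
  have h1 : items.foldl (fun bm wf =>
      if PySem.Str.len wf.1 > 2 ∧ PySem.Str.strIsalpha wf.1 = true ∧ wf.1 ∉ pvStopwords then
        ((bm.1.modify wf.2 [] (fun b => b ++ [wf]) : PySem.Dict Int (List (String × Int))),
          if wf.2 > bm.2 then wf.2 else bm.2)
      else bm) ((PySem.Dict.empty : PySem.Dict Int (List (String × Int))), (0 : Int)) =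
    items.foldl (fun bm wf =>
      ((if pvPredB wf = true then bm.1.modify wf.2 [] (fun b => b ++ [wf]) else bm.1),
       (if pvPredB wf = true then (if wf.2 > bm.2 then wf.2 else bm.2) else bm.2)))
      ((PySem.Dict.empty : PySem.Dict Int (List (String × Int))), (0 : Int)) := by
    apply PySem.List.foldl_congr_mem
    intro acc wf _
    by_cases h : PySem.Str.len wf.1 > 2 ∧ PySem.Str.strIsalpha wf.1 = true ∧ wf.1 ∉ pvStopwords
    · have hb : pvPredB wf = true := by rw [pvPredB, decide_eq_true_eq]; exact h
      rw [if_pos h, if_pos hb, if_pos hb]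
    · have hb : ¬pvPredB wf = true := by rw [pvPredB, decide_eq_true_eq]; exact h
      rw [if_neg h, if_neg hb, if_neg hb]
  rw [h1,
    PySem.List.foldl_prod_mk
      (fun (d : PySem.Dict Int (List (String × Int))) (wf : String × Int) =>
        if pvPredB wf = true then d.modify wf.2 [] (fun b => b ++ [wf]) else d)
      (fun (m : Int) (wf : String × Int) =>
        if pvPredB wf = true then (if wf.2 > m then wf.2 else m) else m)
      items PySem.Dict.empty 0,
    List.foldl_filter, List.foldl_filter]

theorem pv_buckets_getD (el : List (String × Int)) (f : Int) :
    (el.foldl (fun d wf => d.modify wf.2 [] (fun b => b ++ [wf])) PySem.Dict.empty).getD f [] =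
    el.filter (fun p => p.2 == f) := by
  have h := PySem.Dict.getD_foldl_modify_append (el.map (fun wf => (wf.2, wf))) PySem.Dict.empty f
  rw [List.foldl_map] at h
  simp only [PySem.Dict.getD_empty, List.nil_append] at h
  rw [h, List.filter_map, List.map_map]
  simp [Function.comp_def]

theorem pv_maxf_bound (el : List (String × Int)) : ∀ m : Int,
    m ≤ el.foldl (fun m wf => if wf.2 > m then wf.2 else m) m ∧
    ∀ p ∈ el, p.2 ≤ el.foldl (fun m wf => if wf.2 > m then wf.2 else m) m := by
  induction el with
  | nil => intro m; exact ⟨le_refl m, by simp⟩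
  | cons q t ih =>
    intro m
    simp only [List.foldl_cons]
    have h1 : m ≤ (if q.2 > m then q.2 else m) := by split <;> omega
    have h2 : q.2 ≤ (if q.2 > m then q.2 else m) := by split <;> omega
    obtain ⟨ha, hb⟩ := ih (if q.2 > m then q.2 else m)
    refine ⟨le_trans h1 ha, ?_⟩
    intro p hp
    rcases List.mem_cons.mp hp with hq | hpt
    · rw [hq]; exact le_trans h2 ha
    · exact hb p hpt

theorem pv_inner (n : Int) (l : List (String × Int)) : ∀ kws : List (String × Int),
    l.foldl (fun kws wf => if n ≤ (kws.length : Int) then kws else kws ++ [wf]) kws =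
    kws ++ l.take (n - kws.length).toNat := by
  induction l with
  | nil => intro kws; simp
  | cons wf t ih =>
    intro kws
    simp only [List.foldl_cons]
    by_cases h : n ≤ (kws.length : Int)
    · rw [if_pos h, ih]
      have h0 : (n - (kws.length : Int)).toNat = 0 := by omega
      have h1 : (n - ((kws ++ [wf]).length : Int)).toNat = 0 := by simp; omega
      simp [h0, h1]
    · rw [if_neg h, ih]
      have hc : (n - (kws.length : Int)).toNat = (n - ((kws ++ [wf]).length : Int)).toNat + 1 := by
        simp; omega
      rw [hc, List.take_succ_cons]
      simp

theorem pv_outer (n : Int) (bucket : Int → List (String × Int)) (fs : List Int) :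
    ∀ kws : List (String × Int),
    fs.foldl (fun kws f =>
      if n ≤ (kws.length : Int) then kws
      else (bucket f).foldl (fun kws wf => if n ≤ (kws.length : Int) then kws else kws ++ [wf]) kws) kws =
    kws ++ (fs.flatMap bucket).take (n - kws.length).toNat := by
  induction fs with
  | nil => intro kws; simp
  | cons f t ih =>
    intro kws
    simp only [List.foldl_cons, List.flatMap_cons]
    by_cases h : n ≤ (kws.length : Int)
    · rw [if_pos h, ih]
      have h0 : (n - (kws.length : Int)).toNat = 0 := by omega
      simp [h0]
    · rw [if_neg h, pv_inner, ih, List.take_append, ← List.append_assoc]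
      congr 2
      have : ((kws ++ (bucket f).take (n - (kws.length : Int)).toNat).length : Int) =
          (kws.length : Int) + ((min ((n - (kws.length : Int)).toNat) (bucket f).length : Nat) : Int) := by
        simp [List.length_take]
      rw [this]
      omega

theorem pv_insertBy_skip {α : Type} (bf : α → α → Bool) (x : α) (as bs : List α)
    (h : ∀ y ∈ as, bf x y = false) :
    PySem.List.insertBy bf x (as ++ bs) = as ++ PySem.List.insertBy bf x bs := by
  induction as with
  | nil => simp
  | cons a t ih =>
    simp only [List.cons_append, PySem.List.insertBy]
    rw [h a (by simp)]
    simp only [Bool.false_eq_true, if_false, List.cons.injEq, true_and]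
    exact ih (fun y hy => h y (by simp [hy]))

theorem pv_insertBy_front {α : Type} (bf : α → α → Bool) (x : α) (bs : List α)
    (h : ∀ y ∈ bs, bf x y = true) :
    PySem.List.insertBy bf x bs = x :: bs := by
  cases bs with
  | nil => rfl
  | cons b t =>
    simp only [PySem.List.insertBy]
    rw [h b (by simp)]
    simp

theorem pv_mem_Bkt {m : Int} {l : List (String × Int)} {y : String × Int}
    (h : y ∈ pvBkt m l) : 0 < y.2 ∧ y.2 ≤ m := by
  simp only [pvBkt, List.mem_flatMap] at h
  obtain ⟨f, hf, hy⟩ := h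
  rw [PySem.List.mem_pyRange_neg_one] at hf
  have hmem := List.of_mem_filter hy
  rw [beq_iff_eq] at hmem
  omega

theorem pv_Bkt_append_gt (m : Int) (l : List (String × Int)) (x : String × Int) (hx : m < x.2) :
    pvBkt m (l ++ [x]) = pvBkt m l := by
  unfold pvBkt
  apply List.flatMap_congr
  intro f hf
  rw [PySem.List.mem_pyRange_neg_one] at hf
  rw [List.filter_append]
  have hnil : List.filter (fun p => p.2 == f) [x] = [] := by
    simp only [List.filter_cons, List.filter_nil, beq_iff_eq]
    rw [if_neg (by omega)]
  rw [hnil, List.append_nil]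

theorem pv_insertBy_Bkt (x : String × Int) :
    ∀ (k : Nat) (m : Int), m.toNat = k → 0 < x.2 → x.2 ≤ m →
    ∀ l : List (String × Int),
      PySem.List.insertBy (fun a b => decide (b.2 < a.2)) x (pvBkt m l) = pvBkt m (l ++ [x]) := by
  intro k
  induction k with
  | zero => intro m hm h1 h2 l; omega
  | succ k ih =>
    intro m hm h1 h2 l
    have hm0 : 0 < m := by omega
    have hBkt : ∀ l' : List (String × Int),
        pvBkt m l' = l'.filter (fun p => p.2 == m) ++ pvBkt (m - 1) l' := by
      intro l'
      unfold pvBkt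
      rw [PySem.List.pyRange_neg_one_cons hm0, List.flatMap_cons]
    rw [hBkt l, pv_insertBy_skip _ _ _ _ ?hskip]
    case hskip =>
      intro y hy
      have hmem := List.of_mem_filter hy
      rw [beq_iff_eq] at hmem
      simp only [decide_eq_false_iff_not]
      omega
    by_cases hx : x.2 = m
    · rw [pv_insertBy_front _ _ _ ?hfront]
      case hfront =>
        intro y hy
        have := pv_mem_Bkt hy
        simp only [decide_eq_true_eq]
        omega
      rw [hBkt (l ++ [x]), pv_Bkt_append_gt (m - 1) l x (by omega), List.filter_append]
      have hone : List.filter (fun p => p.2 == m) [x] = [x] := by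
        simp only [List.filter_cons, List.filter_nil, beq_iff_eq]
        rw [if_pos hx]
      rw [hone, List.append_assoc, List.singleton_append]
    · rw [ih (m - 1) (by omega) h1 (by omega) l, hBkt (l ++ [x]), List.filter_append]
      have hnil : List.filter (fun p => p.2 == m) [x] = [] := by
        simp only [List.filter_cons, List.filter_nil, beq_iff_eq]
        rw [if_neg hx]
      rw [hnil, List.append_nil]

theorem pv_sorted_eq_Bkt (m : Int) (l : List (String × Int)) (h : ∀ p ∈ l, 0 < p.2 ∧ p.2 ≤ m) :
    PySem.List.sorted l (fun p => p.2) true = pvBkt m l := by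
  induction l using List.reverseRecOn with
  | nil =>
    have : pvBkt m [] = [] := by unfold pvBkt; simp
    rw [this]
    rfl
  | append_singleton l x ih =>
    rw [PySem.List.sorted_rev_eq_foldl_insertBy, List.foldl_append, List.foldl_cons, List.foldl_nil,
      ← PySem.List.sorted_rev_eq_foldl_insertBy, ih (fun p hp => h p (by simp [hp]))]
    exact pv_insertBy_Bkt x m.toNat m rfl (h x (by simp)).1 (h x (by simp)).2 l

theorem pv_Bkt_add (l : List (String × Int)) (m' : Int) (hb : ∀ p ∈ l, p.2 ≤ m') (h0 : 0 ≤ m') :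
    ∀ k : Nat, pvBkt (m' + k) l = pvBkt m' l := by
  intro k
  induction k with
  | zero => simp
  | succ k ih =>
    have hc : PySem.List.pyRange (m' + ((k : Nat) + 1 : Nat)) 0 (-1) =
        (m' + ((k : Nat) + 1 : Nat)) :: PySem.List.pyRange (m' + ((k : Nat) + 1 : Nat) - 1) 0 (-1) :=
      PySem.List.pyRange_neg_one_cons (by push_cast; omega)
    show pvBkt (m' + ((k : Nat) + 1 : Nat)) l = pvBkt m' l
    unfold pvBkt
    rw [hc, List.flatMap_cons]
    have hnil : l.filter (fun p => p.2 == (m' + ((k : Nat) + 1 : Nat) : Int)) = [] := by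
      rw [List.filter_eq_nil_iff]
      intro p hp
      have := hb p hp
      rw [beq_iff_eq]
      push_cast
      omega
    rw [hnil, List.nil_append]
    have harg : m' + ((k : Nat) + 1 : Nat) - 1 = m' + (k : Nat) := by push_cast; ring
    rw [harg]
    exact ih

theorem pv_Bkt_ext (l : List (String × Int)) (m m' : Int) (h0 : 0 ≤ m) (h0' : 0 ≤ m')
    (hm : ∀ p ∈ l, p.2 ≤ m) (hm' : ∀ p ∈ l, p.2 ≤ m') : pvBkt m l = pvBkt m' l := by
  have hx : ∀ a b : Int, 0 ≤ a → (∀ p ∈ l, p.2 ≤ a) → a ≤ b → pvBkt b l = pvBkt a l := by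
    intro a b ha hb hab
    have := pv_Bkt_add l a hb ha (b - a).toNat
    rwa [show a + (((b - a).toNat : Nat) : Int) = b by omega] at this
  calc pvBkt m l = pvBkt (max m m') l := (hx m (max m m') h0 hm (le_max_left _ _)).symm
    _ = pvBkt m' l := hx m' (max m m') h0' hm' (le_max_right _ _)

theorem pv_filter_Bkt (m : Int) (l : List (String × Int)) :
    (pvBkt m l).filter pvPredB = pvBkt m (l.filter pvPredB) := by
  unfold pvBkt
  rw [List.filter_flatMap]
  apply List.flatMap_congr
  intro f _
  rw [List.filter_filter, List.filter_filter]
  apply List.filter_congr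
  intro p _
  exact Bool.and_comm _ _

theorem pv_cap (n : Int) (l : List (String × Int)) : ∀ kws : List (String × Int),
    l.foldl (fun kws wf =>
      if PySem.Str.len wf.1 > 2 ∧ wf.1 ∉ pvStopwords ∧ PySem.Str.strIsalpha wf.1 = true ∧ (kws.length : Int) < n
      then kws ++ [wf] else kws) kws =
    kws ++ (l.filter pvPredB).take (n - kws.length).toNat := by
  induction l with
  | nil => intro kws; simp
  | cons wf t ih =>
    intro kws
    simp only [List.foldl_cons, List.filter_cons]
    by_cases hp : pvPredB wf = true
    · have hp' : PySem.Str.len wf.1 > 2 ∧ PySem.Str.strIsalpha wf.1 = true ∧ wf.1 ∉ pvStopwords := by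
        simpa [pvPredB] using hp
      rw [if_pos hp]
      by_cases hl : (kws.length : Int) < n
      · rw [if_pos ⟨hp'.1, hp'.2.2, hp'.2.1, hl⟩, ih]
        have hc : (n - (kws.length : Int)).toNat = (n - ((kws ++ [wf]).length : Int)).toNat + 1 := by
          simp; omega
        rw [hc, List.take_succ_cons]
        simp
      · rw [if_neg (fun hcon => hl hcon.2.2.2), ih]
        have h0 : (n - (kws.length : Int)).toNat = 0 := by omega
        simp [h0]
    · rw [if_neg hp]
      rw [if_neg (fun hcon => hp (by simp only [pvPredB, decide_eq_true_eq]; exact ⟨hcon.1, hcon.2.2.1, hcon.2.1⟩))]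
      exact ih kws

-- ---- the per-cluster equality ----
theorem pv_percluster (n : Int) (texts : List String) :
    pvBkw n (texts.flatMap pvWords) = pvAkw n texts := by
  have hbm : pvBM (texts.flatMap pvWords) =
      ((((PySem.Dict.counter (texts.flatMap pvWords)).items.filter pvPredB).foldl
          (fun d wf => d.modify wf.2 [] (fun b => b ++ [wf])) PySem.Dict.empty),
       (((PySem.Dict.counter (texts.flatMap pvWords)).items.filter pvPredB).foldl
          (fun m wf => if wf.2 > m then wf.2 else m) 0)) := by
    rw [pvBM, pv_handcount, pv_bm_eq]
  have hb1 : (pvBM (texts.flatMap pvWords)).1 =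
      (((PySem.Dict.counter (texts.flatMap pvWords)).items.filter pvPredB).foldl
        (fun d wf => d.modify wf.2 [] (fun b => b ++ [wf])) PySem.Dict.empty) := by rw [hbm]
  have hb2 : (pvBM (texts.flatMap pvWords)).2 =
      (((PySem.Dict.counter (texts.flatMap pvWords)).items.filter pvPredB).foldl
        (fun m wf => if wf.2 > m then wf.2 else m) 0) := by rw [hbm]
  unfold pvBkw pvAkw
  rw [pv_words_join, hb1, hb2]
  simp only [pv_buckets_getD]
  rw [pv_outer n (fun f => ((PySem.Dict.counter (texts.flatMap pvWords)).items.filter pvPredB).filter (fun p => p.2 == f))]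
  rw [pv_cap]
  have hmem : ∀ p ∈ (PySem.Dict.counter (texts.flatMap pvWords)).items,
      0 < p.2 ∧ p.2 ≤ ((texts.flatMap pvWords).length : Int) := by
    intro p hp
    rw [PySem.Dict.items_counter] at hp
    obtain ⟨k, hk, hpk⟩ := List.mem_map.mp hp
    rw [PySem.Set.mem_ofList] at hk
    rw [← hpk]
    constructor
    · show (0 : Int) < ((List.count k (texts.flatMap pvWords) : Nat) : Int)
      exact_mod_cast List.count_pos_iff.mpr hk
    · show ((List.count k (texts.flatMap pvWords) : Nat) : Int) ≤ ((texts.flatMap pvWords).length : Int)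
      exact_mod_cast List.count_le_length
  rw [pv_sorted_eq_Bkt ((texts.flatMap pvWords).length : Int) _ hmem, pv_filter_Bkt]
  simp only [List.nil_append, List.length_nil, Nat.cast_zero, Int.sub_zero]
  congr 1
  have hb := pv_maxf_bound ((PySem.Dict.counter (texts.flatMap pvWords)).items.filter pvPredB) 0
  apply pv_Bkt_ext
  · exact hb.1
  · exact Int.natCast_nonneg _
  · exact hb.2
  · intro p hp
    exact (hmem p (List.mem_of_mem_filter hp)).2

-- generic: fold over keys with lookups in pvG c = fold over items (Nodup keys)
theorem pv_fold_keys_items (c : PySem.Dict Int (List String)) (hn : c.keys.Nodup)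
    (F : List String → List (String × Int)) (G : List String → List (String × Int))
    (h : ∀ ts, G (ts.flatMap pvWords) = F ts) :
    c.keys.foldl (fun r cid => r.insert cid (G ((pvG c).getD cid []))) PySem.Dict.empty =
    c.items.foldl (fun r kt => r.insert kt.1 (F kt.2)) PySem.Dict.empty := by
  have hkeys : c.keys = c.items.map (fun p => p.1) := rfl
  rw [hkeys, List.foldl_map]
  apply PySem.List.foldl_congr_mem
  intro acc kt hkt
  congr 1
  rw [pv_G_getD, PySem.Dict.getD_of_mem_items c (k := kt.1) (v := kt.2) (by simpa using hkt) hn]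
  exact h kt.2

-- ===== VERDICT (by name: the statement is the Claim_ definition above) =====
theorem extract_cluster_keywords_spec : Claim_equal_extract_cluster_keywords := by
  intro posts cluster_labels n_keywords _ hpre
  show extract_cluster_keywords posts cluster_labels n_keywords =
    extract_cluster_keywords_alt posts cluster_labels n_keywords
  unfold extract_cluster_keywords extract_cluster_keywords_alt
  simp only []
  rw [pv_zipA posts cluster_labels hpre, pv_phase1hom]
  have hnodup : ((posts.zip cluster_labels).foldl (fun c1 pc =>
      let c2 := if c1.contains pc.2 then c1 else c1.insert pc.2 []
      if pvText pc.1 ≠ "" then c2.modify pc.2 [] (fun ts => ts ++ [pvText pc.1]) else c2)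
      PySem.Dict.empty).keys.Nodup :=
    pv_nodup _ PySem.Dict.empty (by rw [PySem.Dict.keys_empty]; exact List.nodup_nil)
  congr 1
  exact (pv_fold_keys_items _ hnodup (fun ts => pvAkw n_keywords ts)
    (fun ws => pvBkw n_keywords ws) (pv_percluster n_keywords)).symm
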